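-- pv_equiv track=rewrite | github.com/lukinvit/presenton-ddd | domains/agent/infrastructure/pipeline_engine.py | _plan_slide_layouts
-- ===== SOURCE A (Python) =====
-- def _plan_slide_layouts(count: int) -> list[str]:
--     """Plan a reasonable layout sequence for N slides."""
--     if count <= 0:
--         return []
--     layouts = ["title_slide"]
--     if count >= 3:
--         layouts.append("content")  # agenda
--     mid = count - 2 if count > 2 else 0
--     pattern = ["content", "two_column", "content", "data_chart", "content", "quote"]
--     for i in range(mid):
--         layouts.append(pattern[i % len(pattern)])
--     if count >= 2:
--         layouts.append("thank_you")
--     return layouts[:count]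
-- ===== SOURCE B (Python) =====
-- def _plan_slide_layouts(count: int) -> list[str]:
--     """Plan a reasonable layout sequence for N slides (per-slot closed form)."""
--     def name_at(i: int) -> str:
--         if i == 0:
--             return "title_slide"
--         if count == 2:
--             return "thank_you"  # only slot 1 of a 2-slide deck
--         if i == 1:
--             return "content"  # agenda
--         return ("content", "two_column", "content",
--                 "data_chart", "content", "quote")[(i - 2) % 6]
--     return [name_at(i) for i in range(count)]
-- ===== Notes on version B (the rewrite author's own statement) =====
-- stated objective: alternative
-- what changed: B computes each slide's layout independently by a closed-form slot-index function and maps it over range(count), instead of A's stateful build (append agenda, loop appending a cyclic pattern, append thank_you) followed by truncation.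
import Mathlib
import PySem

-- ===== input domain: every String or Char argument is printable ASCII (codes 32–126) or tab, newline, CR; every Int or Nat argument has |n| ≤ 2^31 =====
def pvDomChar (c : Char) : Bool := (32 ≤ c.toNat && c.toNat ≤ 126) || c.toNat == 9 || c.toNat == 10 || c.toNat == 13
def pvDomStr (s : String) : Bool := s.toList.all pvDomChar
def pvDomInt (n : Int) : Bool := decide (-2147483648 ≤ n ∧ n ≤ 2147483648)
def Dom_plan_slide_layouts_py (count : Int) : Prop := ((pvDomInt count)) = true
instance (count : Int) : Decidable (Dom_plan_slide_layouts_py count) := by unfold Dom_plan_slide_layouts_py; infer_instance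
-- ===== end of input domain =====

-- B maps a closed-form per-slot function over range(count) instead of A's build-then-truncate (alternative decomposition, same cost).


-- ===== PORT A =====
-- pattern[i % 6]: i ranges over range(mid) with mid ≥ 0, so 0 ≤ i % 6 < 6 and Python never raises;
-- pyGetD with default "" is exact here.
def plan_slide_layouts_py (count : Int) : List String :=
  if count ≤ 0 then []
  else
    let layouts : List String := ["title_slide"]
    let layouts := if count ≥ 3 then layouts ++ ["content"] else layouts
    let mid : Int := if count > 2 then count - 2 else 0
    let pattern : List String := ["content", "two_column", "content", "data_chart", "content", "quote"]
    let layouts := (PySem.List.pyRange 0 mid 1).foldl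
      (fun acc i => acc ++ [PySem.List.pyGetD pattern (PySem.Int.mod i 6) ""]) layouts
    let layouts := if count ≥ 2 then layouts ++ ["thank_you"] else layouts
    PySem.List.slice layouts none (some count)

-- ===== PORT B =====
-- name_at: the tuple index (i-2) % 6 is a Nat in [0,6) since i ≥ 2 there, so getD is exact.
def pvNameAt (count : Int) (i : Nat) : String :=
  if i = 0 then "title_slide"
  else if count = 2 then "thank_you"
  else if i = 1 then "content"
  else (["content", "two_column", "content", "data_chart", "content", "quote"] : List String).getD ((i - 2) % 6) ""

-- [name_at(i) for i in range(count)]; range of a nonpositive count is empty, as is List.range count.toNat.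
def plan_slide_layouts_py_alt (count : Int) : List String :=
  (List.range count.toNat).map (pvNameAt count)

-- ===== PRECONDITION & SPEC =====
def Spec_plan_slide_layouts_py (count : Int) (out : List String) : Prop := out = plan_slide_layouts_py_alt count
instance (count : Int) (out : List String) : Decidable (Spec_plan_slide_layouts_py count out) := by unfold Spec_plan_slide_layouts_py; infer_instance

-- ===== CLAIM (what is proved, stated in full; the proofs are below) =====
def Claim_equal_plan_slide_layouts_py : Prop := ∀ (count : Int), Dom_plan_slide_layouts_py count → Spec_plan_slide_layouts_py count (plan_slide_layouts_py count)

-- ===== LEMMAS AND PROOFS =====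

-- the cyclic body element A's loop appends at step k
def pvPat (k : Nat) : String :=
  ["content", "two_column", "content", "data_chart", "content", "quote"].getD (k % 6) ""

-- ===== VERDICT (by name: the statement is the Claim_ definition above) =====
theorem plan_slide_layouts_py_spec : Claim_equal_plan_slide_layouts_py := by
  intro count _
  unfold Spec_plan_slide_layouts_py plan_slide_layouts_py plan_slide_layouts_py_alt
  by_cases h0 : count ≤ 0
  · have : count.toNat = 0 := by omega
    simp [h0, this]
  · by_cases h1 : count = 1
    · subst h1; decide
    · by_cases h2 : count = 2
      · subst h2; decide
      · obtain ⟨n, hn, hn1⟩ : ∃ n : Nat, count = (n : Int) + 2 ∧ 1 ≤ n :=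
          ⟨(count - 2).toNat, by omega, by omega⟩
        subst hn
        simp only [show ¬((n : Int) + 2 ≤ 0) from by omega,
          show ((n : Int) + 2 ≥ 3) from by omega, if_pos,
          show ((n : Int) + 2 > 2) from by omega,
          show ((n : Int) + 2 ≥ 2) from by omega, if_false]
        -- A side: the append loop is a map over range n
        have hmid : (n : Int) + 2 - 2 = (n : Int) := by ring
        rw [hmid, PySem.List.pyRange_one, List.foldl_map,
          PySem.List.foldl_append_singleton_eq_map,
          show ((n : Int) - 0).toNat = n from by omega]
        have hmap : (List.range n).map
            (fun k : Nat => PySem.List.pyGetD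
              (["content", "two_column", "content", "data_chart", "content", "quote"] : List String)
              (PySem.Int.mod ((0 : Int) + (k : Int)) 6) "")
            = (List.range n).map pvPat := by
          apply List.map_congr_left
          intro k _
          have hk : PySem.Int.mod ((0 : Int) + (k : Int)) 6 = (((k % 6 : Nat)) : Int) := by
            rw [zero_add]
            exact_mod_cast PySem.Int.mod_natCast k 6
          rw [hk, PySem.List.pyGetD_natCast]
          rfl
        rw [hmap]
        -- A side: the final slice takes the n+2 elements before "thank_you"
        have hc : ((n : Int) + 2) = ((n + 2 : Nat) : Int) := by push_cast; ring
        rw [hc, PySem.List.slice_to_natCast,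
          show (["title_slide"] ++ ["content"] ++ (List.range n).map pvPat ++ ["thank_you"])
              = (["title_slide"] ++ ["content"] ++ (List.range n).map pvPat) ++ ["thank_you"] from by simp,
          List.take_left' (by simp)]
        -- B side: split range (n+2) into the two fixed slots and the shifted body slots
        rw [show ((((n + 2 : Nat) : Int)).toNat) = 2 + n from by omega,
          List.range_add, List.map_append, List.map_map]
        have hfix : (List.range 2).map (pvNameAt ((n + 2 : Nat) : Int)) = ["title_slide", "content"] := by
          have hn0 : ¬(n = 0) := by omega
          simp [List.range_succ, pvNameAt, hn0]
        have hbody : (List.range n).map (pvNameAt ((n + 2 : Nat) : Int) ∘ fun x => 2 + x)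
            = (List.range n).map pvPat := by
          apply List.map_congr_left
          intro k _
          have hn0 : ¬(n = 0) := by omega
          simp [Function.comp, pvNameAt, hn0, pvPat, Nat.add_comm 2 k]
        rw [hfix, hbody]
        simp
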